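-- pv_equiv track=rewrite | github.com/Shanuram67/Multi-Task-performer | backend/agents/frontend_agent.py | process_frontend_tasks
-- ===== SOURCE A (Python) =====
-- def process_frontend_tasks(tasks):
--     """
--     Simulate frontend agent behavior: refine or expand UI-related tasks.
--     """
--     refined_tasks = []
--     for task in tasks:
--         if "dashboard" in task.lower():
--             refined_tasks.append("Design wireframe for dashboard layout.")
--             refined_tasks.append("Develop dashboard using React components.")
--         elif "form" in task.lower():
--             refined_tasks.append("Implement controlled form components with validation.")
--             refined_tasks.append("Style forms using Tailwind CSS.")
--         elif "component" in task.lower():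
--             refined_tasks.append("Create reusable React component structure.")
--             refined_tasks.append("Integrate component into the main layout.")
--         else:
--             refined_tasks.append(f"Setup {task.lower()} in React environment.")
--
--     return refined_tasks
-- ===== SOURCE B (Python) =====
-- _KEYWORDS = ("dashboard", "form", "component")
--
-- # keyword candidates indexed by their first character, for the position scan
-- _BY_FIRST = {"d": ("dashboard",), "f": ("form",), "c": ("component",)}
--
-- _EXPANSIONS = {
--     "dashboard": ["Design wireframe for dashboard layout.",
--                   "Develop dashboard using React components."],
--     "form": ["Implement controlled form components with validation.",
--              "Style forms using Tailwind CSS."],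
--     "component": ["Create reusable React component structure.",
--                   "Integrate component into the main layout."],
-- }
--
--
-- def _keywords_at(t):
--     """All keywords occurring in t, found by ONE left-to-right position scan
--     (multi-pattern matching dispatched on the first character), instead of one
--     full substring search per keyword."""
--     found = set()
--     for i, c in enumerate(t):
--         for kw in _BY_FIRST.get(c, ()):
--             if t.startswith(kw, i):
--                 found.add(kw)
--     return found
--
--
-- def _expand(task):
--     t = task.lower()
--     found = _keywords_at(t)
--     for kw in _KEYWORDS:
--         if kw in found:
--             return _EXPANSIONS[kw]
--     return ["Setup {} in React environment.".format(t)]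
--
--
-- def process_frontend_tasks(tasks):
--     chunks = [_expand(task) for task in tasks]
--     return [s for chunk in chunks for s in chunk]
-- ===== Notes on version B (the rewrite author's own statement) =====
-- stated objective: alternative
-- what changed: Replaces the per-keyword if/elif substring tests with a single left-to-right position scan that matches all three keywords at once into a set, picks the winner by priority from that set against a keyword->expansion dict, and assembles the result in two staged passes (per-task chunks, then a flatten) instead of one append-accumulator loop.
import Mathlib
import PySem

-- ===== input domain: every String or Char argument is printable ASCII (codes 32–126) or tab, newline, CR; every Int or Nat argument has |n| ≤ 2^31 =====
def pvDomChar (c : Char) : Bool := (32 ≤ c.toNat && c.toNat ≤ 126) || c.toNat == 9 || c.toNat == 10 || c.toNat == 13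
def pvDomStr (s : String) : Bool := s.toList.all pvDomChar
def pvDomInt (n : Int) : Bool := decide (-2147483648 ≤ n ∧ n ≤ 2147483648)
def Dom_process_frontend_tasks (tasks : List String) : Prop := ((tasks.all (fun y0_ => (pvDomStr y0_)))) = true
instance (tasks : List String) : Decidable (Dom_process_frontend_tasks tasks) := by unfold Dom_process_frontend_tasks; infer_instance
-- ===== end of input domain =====

-- B replaces A's per-keyword if/elif substring tests with one position scan matching all
-- keywords at once into a set, priority-picks from that set via a keyword->expansion
-- dict, and assembles the result in two staged passes (alternative decomposition; same cost).

-- ===== PORT A =====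
def process_frontend_tasks (tasks : List String) : List String :=
  tasks.foldl (fun refined_tasks task =>
      if PySem.Str.isIn "dashboard" (PySem.Str.lower task) then
        refined_tasks ++ ["Design wireframe for dashboard layout.",
                          "Develop dashboard using React components."]
      else if PySem.Str.isIn "form" (PySem.Str.lower task) then
        refined_tasks ++ ["Implement controlled form components with validation.",
                          "Style forms using Tailwind CSS."]
      else if PySem.Str.isIn "component" (PySem.Str.lower task) then
        refined_tasks ++ ["Create reusable React component structure.",
                          "Integrate component into the main layout."]
      else
        refined_tasks ++ ["Setup " ++ PySem.Str.lower task ++ " in React environment."])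
    []

-- ===== PORT B =====
def pvKeywords : List String := ["dashboard", "form", "component"]

-- _BY_FIRST: keyword candidates indexed by their first character
def pvByFirst : PySem.Dict Char (List String) :=
  PySem.Dict.ofList [('d', ["dashboard"]), ('f', ["form"]), ('c', ["component"])]

def pvExpansions : PySem.Dict String (List String) :=
  PySem.Dict.ofList
  [("dashboard", ["Design wireframe for dashboard layout.",
                  "Develop dashboard using React components."]),
   ("form", ["Implement controlled form components with validation.",
             "Style forms using Tailwind CSS."]),
   ("component", ["Create reusable React component structure.",
                  "Integrate component into the main layout."])]

-- t.startswith(kw, i) with 0 ≤ i: exact as "kw is a prefix of t dropped by i"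
def pvStartswithAt (t : List Char) (kw : String) (i : Int) : Bool :=
  kw.toList.isPrefixOf (t.drop i.toNat)

-- _keywords_at: one scan over enumerate(t), testing the first-char candidates at each offset
def pvKeywordsAt (t : List Char) : PySem.Set String :=
  (PySem.List.enumerate t 0).foldl
    (fun found ic =>
      (pvByFirst.getD ic.2 []).foldl
        (fun fd kw => if pvStartswithAt t kw ic.1 then PySem.Set.add fd kw else fd) found)
    PySem.Set.empty

-- _expand: priority pick from the found set; _EXPANSIONS[kw] (kw always a key, default unreachable)
def pvExpand (task : String) : List String :=
  let t := PySem.Str.lower task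
  let found := pvKeywordsAt t.toList
  match pvKeywords.find? (fun kw => PySem.Set.contains found kw) with
  | some kw => pvExpansions.getD kw []
  | none => ["Setup " ++ t ++ " in React environment."]

def process_frontend_tasks_alt (tasks : List String) : List String :=
  (tasks.map pvExpand).flatten

-- ===== PRECONDITION & SPEC =====
def Spec_process_frontend_tasks (tasks : List String) (out : List String) : Prop := out = process_frontend_tasks_alt tasks
instance (tasks : List String) (out : List String) : Decidable (Spec_process_frontend_tasks tasks out) := by unfold Spec_process_frontend_tasks; infer_instance

-- ===== CLAIM (what is proved, stated in full; the proofs are below) =====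
def Claim_equal_process_frontend_tasks : Prop := ∀ (tasks : List String), Dom_process_frontend_tasks tasks → Spec_process_frontend_tasks tasks (process_frontend_tasks tasks)

-- ===== LEMMAS AND PROOFS =====

theorem mem_foldl_add_if (kws : List String) (p : String → Bool) (x : String) :
    ∀ (fd : PySem.Set String),
      x ∈ kws.foldl (fun fd kw => if p kw then PySem.Set.add fd kw else fd) fd ↔
        x ∈ fd ∨ (x ∈ kws ∧ p x = true) := by
  induction kws with
  | nil => intro fd; simp
  | cons k ks ih =>
    intro fd
    simp only [List.foldl_cons, ih, List.mem_cons]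
    by_cases hk : p k = true
    · simp only [hk, if_pos, PySem.Set.mem_add]
      constructor
      · rintro ((h | rfl) | h) <;> tauto
      · rintro (h | ⟨(rfl | h), hp⟩) <;> tauto
    · simp only [if_neg hk]
      constructor
      · rintro (h | h) <;> tauto
      · rintro (h | ⟨(rfl | h), hp⟩) <;> tauto

theorem mem_foldl_scan (t : List Char) (x : String) :
    ∀ (l : List (Int × Char)) (s₀ : PySem.Set String),
      x ∈ l.foldl
        (fun found ic => (pvByFirst.getD ic.2 []).foldl
          (fun fd kw => if pvStartswithAt t kw ic.1 then PySem.Set.add fd kw else fd) found) s₀ ↔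
        x ∈ s₀ ∨ ∃ ic ∈ l, x ∈ pvByFirst.getD ic.2 [] ∧ pvStartswithAt t x ic.1 = true := by
  intro l
  induction l with
  | nil => intro s₀; simp
  | cons ic l ih =>
    intro s₀
    rw [List.foldl_cons]
    simp only [ih, mem_foldl_add_if, List.mem_cons]
    constructor
    · rintro ((h | ⟨hm, hp⟩) | ⟨jc, hj, hm, hp⟩)
      · exact Or.inl h
      · exact Or.inr ⟨ic, Or.inl rfl, hm, hp⟩
      · exact Or.inr ⟨jc, Or.inr hj, hm, hp⟩
    · rintro (h | ⟨jc, (rfl | hj), hm, hp⟩)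
      · exact Or.inl (Or.inl h)
      · exact Or.inl (Or.inr ⟨hm, hp⟩)
      · exact Or.inr ⟨jc, hj, hm, hp⟩

theorem mem_keywordsAt (t : List Char) (x : String) :
    x ∈ pvKeywordsAt t ↔
      ∃ (k : Nat) (h : k < t.length),
        x ∈ pvByFirst.getD t[k] [] ∧ pvStartswithAt t x (k : Int) = true := by
  unfold pvKeywordsAt
  rw [mem_foldl_scan]
  simp only [PySem.Set.empty, List.not_mem_nil, false_or, PySem.List.mem_enumerate_iff]
  constructor
  · rintro ⟨ic, ⟨k, hk, rfl⟩, hm, hp⟩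
    simp only [zero_add] at hm hp
    exact ⟨k, hk, hm, hp⟩
  · rintro ⟨k, hk, hm, hp⟩
    exact ⟨((k : Int), t[k]), ⟨k, hk, by simp⟩, hm, hp⟩

theorem getElem_of_prefix_drop (t : List Char) (c : Char) (cs : List Char) (j : Nat)
    (hj : j < t.length) (h : (c :: cs) <+: t.drop j) : t[j] = c := by
  obtain ⟨u, hu⟩ := h
  have h1 : (List.drop j t)[0]? = some c := by rw [← hu]; rfl
  rw [List.getElem?_drop] at h1
  simp only [Nat.add_zero] at h1
  obtain ⟨_, h2⟩ := List.getElem?_eq_some_iff.mp h1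
  exact h2

theorem contains_keywordsAt (s : String) (kw : String)
    (hne : kw.toList ≠ [])
    (hcand : kw ∈ pvByFirst.getD (kw.toList.headD ' ') []) :
    PySem.Set.contains (pvKeywordsAt s.toList) kw = PySem.Str.isIn kw s := by
  by_cases h : PySem.Str.isIn kw s = true
  · rw [h]
    simp only [PySem.Set.contains]
    rw [List.contains_iff_mem, mem_keywordsAt]
    rw [PySem.Str.isIn_iff_infix] at h
    obtain ⟨j, hj⟩ := (PySem.Chars.exists_prefix_drop_iff_isIn _ _).mpr
      ((PySem.Chars.isIn_iff_infix _ _).mpr h)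
    have hjlt : j < s.toList.length := by
      by_contra hge
      rw [List.drop_eq_nil_of_le (by omega)] at hj
      exact hne (List.prefix_nil.mp hj)
    refine ⟨j, hjlt, ?_, ?_⟩
    · cases hcl : kw.toList with
      | nil => exact absurd hcl hne
      | cons c cs =>
        rw [hcl] at hj
        rw [getElem_of_prefix_drop s.toList c cs j hjlt hj]
        rw [hcl] at hcand
        simpa using hcand
    · simpa [pvStartswithAt] using hj
  · rw [Bool.not_eq_true] at h
    rw [h]
    simp only [PySem.Set.contains]
    rw [Bool.eq_false_iff, ne_eq, List.contains_iff_mem, mem_keywordsAt]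
    rintro ⟨i, hi, _, hp⟩
    have hpre : kw.toList <+: s.toList.drop i := by
      simpa [pvStartswithAt] using hp
    have : PySem.Str.isIn kw s = true := by
      rw [PySem.Str.isIn_iff_infix]
      exact (PySem.Chars.isIn_iff_infix _ _).mp
        ((PySem.Chars.exists_prefix_drop_iff_isIn _ _).mp ⟨i, hpre⟩)
    rw [h] at this
    exact Bool.false_ne_true this

theorem step_eq_expand (acc : List String) (task : String) :
    (if PySem.Str.isIn "dashboard" (PySem.Str.lower task) then
        acc ++ ["Design wireframe for dashboard layout.",
                "Develop dashboard using React components."]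
      else if PySem.Str.isIn "form" (PySem.Str.lower task) then
        acc ++ ["Implement controlled form components with validation.",
                "Style forms using Tailwind CSS."]
      else if PySem.Str.isIn "component" (PySem.Str.lower task) then
        acc ++ ["Create reusable React component structure.",
                "Integrate component into the main layout."]
      else
        acc ++ ["Setup " ++ PySem.Str.lower task ++ " in React environment."]) =
      acc ++ pvExpand task := by
  unfold pvExpand
  have h1 := contains_keywordsAt (PySem.Str.lower task) "dashboard" (by decide) (by decide)
  have h2 := contains_keywordsAt (PySem.Str.lower task) "form" (by decide) (by decide)
  have h3 := contains_keywordsAt (PySem.Str.lower task) "component" (by decide) (by decide)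

  simp only [pvKeywords, List.find?, h1, h2, h3]
  split_ifs with g1 g2 g3 <;> simp_all [pvExpansions] <;> decide

theorem foldl_A_eq_flatMap (tasks : List String) (acc : List String) :
    tasks.foldl (fun refined_tasks task =>
      if PySem.Str.isIn "dashboard" (PySem.Str.lower task) then
        refined_tasks ++ ["Design wireframe for dashboard layout.",
                          "Develop dashboard using React components."]
      else if PySem.Str.isIn "form" (PySem.Str.lower task) then
        refined_tasks ++ ["Implement controlled form components with validation.",
                          "Style forms using Tailwind CSS."]
      else if PySem.Str.isIn "component" (PySem.Str.lower task) then
        refined_tasks ++ ["Create reusable React component structure.",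
                          "Integrate component into the main layout."]
      else
        refined_tasks ++ ["Setup " ++ PySem.Str.lower task ++ " in React environment."]) acc
      = acc ++ tasks.flatMap pvExpand := by
  induction tasks generalizing acc with
  | nil => simp
  | cons t ts ih =>
    rw [List.foldl_cons, step_eq_expand, ih, List.flatMap_cons, List.append_assoc]

-- ===== VERDICT (by name: the statement is the Claim_ definition above) =====
theorem process_frontend_tasks_spec : Claim_equal_process_frontend_tasks := by
  intro tasks _
  unfold Spec_process_frontend_tasks process_frontend_tasks process_frontend_tasks_alt
  rw [foldl_A_eq_flatMap]
  simp [List.flatMap_def]
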